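-- pv_equiv track=rewrite | github.com/katrinakalantar/PhageDisplayLib | Agilent_Order.py | remove_cutsites
-- ===== SOURCE A (Python) =====
-- def remove_cutsites(sequence):
--     '''Passed a sequence, will return one with  the restriction sites for EcoRI and XhoI replaced/removed with synonymous mutations'''
--
--     #restriction sites
--     ecor1 = 'GAATTC'
--     xho1 = 'CTCGAG'
--     hindIII = 'AAGCCT'
--     bser1_f = 'GAGGAG'
--     bser1_r = 'CTCCTC'
--     mme1_1_f = 'TCCAAC'
--     mme1_1_r = 'GTTGGA'
--     mme1_2_f = 'TCCGAC'
--     mme1_2_r = 'GTCGGA'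
--
--     new_sequence = sequence
--
--     for base in range(len(sequence)):
--         kmer_6 = sequence[base:base+6]
--
--         if kmer_6 == ecor1:
--             #using the base (index) to keep track of the frame as to allow synonymous mutations
--             if base%3 == 0: # cut site is in frame, codons read in cut site = GAG TTC, change to GAG TTC
--                 new_sequence = new_sequence[0:base] + 'GAGTTC'+ new_sequence[base+6:]
--             if base%3 == 1: #cut site is shifted one over... meaning codon read is ATT
--                 new_sequence = new_sequence[0:base] + 'GAATCC'+ new_sequence[base+6:]
--             if base%3 == 2:  #cut site is shifted one over... meaning codon read as AAT
--                 new_sequence = new_sequence[0:base] + 'GAATTC'+ new_sequence[base+6:]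
--
--         if kmer_6 == xho1:
--             if base%3 == 0: #cut site is in frame, codons read = CTC GAG
--                 new_sequence = new_sequence[0:base] + 'CTTGAG' + new_sequence[base+6:]
--             if base%3 == 1: #cut site is read as XCT CGA GXX. Change CGA to CGT
--                 new_sequence = new_sequence[0:base] + 'CTCGTG' + new_sequence[base+6:]
--             if base%3 == 2: #cut site is read as XXC TCG AGX. Change to AGC (Serine)
--                 new_sequence = new_sequence[0:base] + 'CAGCAG' + new_sequence[base+6:]
--
--         if kmer_6 == hindIII:
--             if base%3 == 0: #cut site is in frame, codons read AAG CCT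
--                 new_sequence = new_sequence[0:base] + 'AAACCA' + new_sequence[base+6:]
--             if base%3 == 1: #cut site is read XAA GCC TXX
--                 new_sequence = new_sequence[0:base] + 'AAGCGT' + new_sequence[base+6:]
--             if base%3 == 2: #cut side read as XXA AGC CTX
--                 new_sequence = new_sequence[0:base] + 'AAGTCT' + new_sequence[base+6:]
--
--     return new_sequence
-- ===== SOURCE B (Python) =====
-- def remove_cutsites(sequence):
--     '''Passed a sequence, will return one with  the restriction sites for EcoRI and XhoI replaced/removed with synonymous mutations'''
--     table = {
--         'GAATTC': ('GAGTTC', 'GAATCC', 'GAATTC'),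
--         'CTCGAG': ('CTTGAG', 'CTCGTG', 'CAGCAG'),
--         'AAGCCT': ('AAACCA', 'AAGCGT', 'AAGTCT'),
--     }
--     # stage 1: collect every match of the original sequence with its frame replacement
--     matches = [(i, table[sequence[i:i+6]][i % 3])
--                for i in range(len(sequence) - 5) if sequence[i:i+6] in table]
--     # stage 2: override map, position -> new char; a later match overwrites overlaps
--     cover = {}
--     for i, rep in matches:
--         for j, ch in enumerate(rep):
--             cover[i + j] = ch
--     # stage 3: render the output positionally
--     return ''.join(cover.get(j, c) for j, c in enumerate(sequence))
-- ===== Notes on version B (the rewrite author's own statement) =====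
-- stated objective: alternative
-- what changed: B replaces A's sequential in-place rewriting of the evolving string (whole-string slice-and-concat per match, 9 if-branches) by three staged passes: collect all (position, frame-replacement) matches of the original sequence from one table, build a position-to-char override map where later matches overwrite overlaps, then render the output positionally in one comprehension.
import Mathlib
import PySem

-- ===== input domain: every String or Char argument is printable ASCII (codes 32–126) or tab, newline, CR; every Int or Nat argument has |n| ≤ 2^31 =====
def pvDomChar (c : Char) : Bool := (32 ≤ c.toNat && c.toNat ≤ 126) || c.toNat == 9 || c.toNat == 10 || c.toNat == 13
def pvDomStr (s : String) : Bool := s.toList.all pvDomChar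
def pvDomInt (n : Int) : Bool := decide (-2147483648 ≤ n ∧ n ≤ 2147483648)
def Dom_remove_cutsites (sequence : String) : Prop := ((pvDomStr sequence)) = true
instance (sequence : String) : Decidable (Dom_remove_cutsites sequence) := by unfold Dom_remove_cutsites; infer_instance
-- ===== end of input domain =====

-- B replaces A's sequential in-place rewriting of the evolving string (whole-string
-- slice-and-concat per match, 9 branches) by three staged passes: collect every
-- (position, frame-replacement) match of the original sequence, build a position->char
-- override map (later matches overwrite overlaps), then render the output positionally.

-- ===== PORT A =====
-- new_sequence[0:base] + rep + new_sequence[base+6:]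
def rcA_repl (ns : List Char) (base : Int) (rep : List Char) : List Char :=
  PySem.List.slice ns (some 0) (some base) ++ rep ++ PySem.List.slice ns (some (base + 6)) none

-- one iteration of A's loop body (new_sequence is the state, kmer taken from the ORIGINAL sequence)
def rcA_step (s : List Char) (ns : List Char) (base : Int) : List Char :=
  let kmer6 := PySem.List.slice s (some base) (some (base + 6))
  let ns :=
    if kmer6 = "GAATTC".toList then
      let ns := if PySem.Int.mod base 3 = 0 then rcA_repl ns base "GAGTTC".toList else ns
      let ns := if PySem.Int.mod base 3 = 1 then rcA_repl ns base "GAATCC".toList else ns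
      if PySem.Int.mod base 3 = 2 then rcA_repl ns base "GAATTC".toList else ns
    else ns
  let ns :=
    if kmer6 = "CTCGAG".toList then
      let ns := if PySem.Int.mod base 3 = 0 then rcA_repl ns base "CTTGAG".toList else ns
      let ns := if PySem.Int.mod base 3 = 1 then rcA_repl ns base "CTCGTG".toList else ns
      if PySem.Int.mod base 3 = 2 then rcA_repl ns base "CAGCAG".toList else ns
    else ns
  if kmer6 = "AAGCCT".toList then
    let ns := if PySem.Int.mod base 3 = 0 then rcA_repl ns base "AAACCA".toList else ns
    let ns := if PySem.Int.mod base 3 = 1 then rcA_repl ns base "AAGCGT".toList else ns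
    if PySem.Int.mod base 3 = 2 then rcA_repl ns base "AAGTCT".toList else ns
  else ns

def remove_cutsites (sequence : String) : String :=
  let s := sequence.toList
  String.ofList ((PySem.List.pyRange 0 (PySem.Str.len sequence) 1).foldl (rcA_step s) s)

-- ===== PORT B =====
-- Source B's dict literal: cut site -> replacements for frames 0, 1, 2
def rcB_table : PySem.Dict (List Char) (List Char × List Char × List Char) :=
  PySem.Dict.mk
    [("GAATTC".toList, ("GAGTTC".toList, "GAATCC".toList, "GAATTC".toList)),
     ("CTCGAG".toList, ("CTTGAG".toList, "CTCGTG".toList, "CAGCAG".toList)),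
     ("AAGCCT".toList, ("AAACCA".toList, "AAGCGT".toList, "AAGTCT".toList))]

-- the comprehension's element: (i, table[sequence[i:i+6]][i % 3]) when the window is in the table
def rcB_match (s : List Char) (i : Int) : Option (Int × List Char) :=
  (PySem.Dict.get? rcB_table (PySem.List.slice s (some i) (some (i + 6)))).map
    (fun rep => (i, if PySem.Int.mod i 3 = 0 then rep.1
                    else if PySem.Int.mod i 3 = 1 then rep.2.1 else rep.2.2))

-- stage 1: matches = [(i, table[...][i%3]) for i in range(len(sequence)-5) if ...]
def rcB_matches (s : List Char) (n : Int) : List (Int × List Char) :=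
  (PySem.List.pyRange 0 (n - 5) 1).filterMap (rcB_match s)

-- stage 2: cover = {}; for i, rep in matches: for j, ch in enumerate(rep): cover[i+j] = ch
def rcB_cover (ms : List (Int × List Char)) : PySem.Dict Int Char :=
  ms.foldl
    (fun d m => (PySem.List.enumerate m.2 0).foldl (fun d p => d.insert (m.1 + p.1) p.2) d)
    PySem.Dict.empty

def remove_cutsites_alt (sequence : String) : String :=
  let s := sequence.toList
  let cover := rcB_cover (rcB_matches s (PySem.Str.len sequence))
  -- stage 3: ''.join(cover.get(j, c) for j, c in enumerate(sequence))
  String.ofList ((PySem.List.enumerate s 0).map (fun p => (PySem.Dict.get? cover p.1).getD p.2))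

-- ===== PRECONDITION & SPEC =====
def Spec_remove_cutsites (sequence : String) (out : String) : Prop := out = remove_cutsites_alt sequence
instance (sequence : String) (out : String) : Decidable (Spec_remove_cutsites sequence out) := by unfold Spec_remove_cutsites; infer_instance

-- ===== CLAIM (what is proved, stated in full; the proofs are below) =====
def Claim_equal_remove_cutsites : Prop := ∀ (sequence : String), Dom_remove_cutsites sequence → Spec_remove_cutsites sequence (remove_cutsites sequence)

-- ===== LEMMAS AND PROOFS =====

-- a fold whose body skips the elements a partial function rejects is a fold over its filterMap
theorem rc_foldl_filterMap {α β γ : Type} (h : α → Option γ) (g : β → γ → β) (l : List α) (acc : β) :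
    l.foldl (fun a x => match h x with | none => a | some y => g a y) acc
      = (l.filterMap h).foldl g acc := by
  induction l generalizing acc with
  | nil => rfl
  | cons x t ih => cases hx : h x <;> simp [hx, ih]

-- B's rendering of the original string through an override dict
def rcRender (d : PySem.Dict Int Char) (s : List Char) : List Char :=
  (PySem.List.enumerate s 0).map (fun p => (PySem.Dict.get? d p.1).getD p.2)

-- A's loop body, seen through B's table: do nothing or splice the frame replacement in
theorem rc_step_match (s ns : List Char) (i : Int) :
    rcA_step s ns i =
      match rcB_match s i with
      | none => ns
      | some m => rcA_repl ns m.1 m.2 := by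
  unfold rcA_step rcB_match
  by_cases h1 : PySem.List.slice s (some i) (some (i + 6)) = "GAATTC".toList
  · have h3 := PySem.Int.mod_nonneg i (b := 3) (by omega)
    have h4 := PySem.Int.mod_lt i (b := 3) (by omega)
    interval_cases h : (PySem.Int.mod i 3) <;>
      simp [h1, rcB_table, PySem.Dict.get?]
  · by_cases h2 : PySem.List.slice s (some i) (some (i + 6)) = "CTCGAG".toList
    · have h3 := PySem.Int.mod_nonneg i (b := 3) (by omega)
      have h4 := PySem.Int.mod_lt i (b := 3) (by omega)
      interval_cases h : (PySem.Int.mod i 3) <;>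
        simp [h2, rcB_table, PySem.Dict.get?]
    · by_cases h5 : PySem.List.slice s (some i) (some (i + 6)) = "AAGCCT".toList
      · have h3 := PySem.Int.mod_nonneg i (b := 3) (by omega)
        have h4 := PySem.Int.mod_lt i (b := 3) (by omega)
        interval_cases h : (PySem.Int.mod i 3) <;>
          simp [h5, rcB_table, PySem.Dict.get?]
      · simp at h1 h2 h5
        simp [h1, h2, h5, Ne.symm h1, Ne.symm h2, Ne.symm h5, rcB_table, PySem.Dict.get?]

-- A's splice 'new_sequence[0:base] + rep + new_sequence[base+6:]' is take/++/drop at a Nat index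
theorem rc_repl_eq (l : List Char) (k : Nat) (rep : List Char) :
    rcA_repl l (k : Int) rep = l.take k ++ rep ++ l.drop (k + 6) := by
  unfold rcA_repl
  rw [PySem.List.slice_zero_start, PySem.List.slice_to_natCast]
  have h6 : ((k : Int) + 6) = ((k + 6 : Nat) : Int) := by push_cast; ring
  rw [h6, PySem.List.slice_from_natCast]

theorem rc_render_length (d : PySem.Dict Int Char) (s : List Char) :
    (rcRender d s).length = s.length := by
  simp [rcRender, PySem.List.length_enumerate]

theorem rc_render_empty (s : List Char) : rcRender PySem.Dict.empty s = s := by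
  unfold rcRender
  simp only [PySem.Dict.get?_empty, Option.getD_none]
  exact PySem.List.map_snd_enumerate s 0

theorem rc_render_getElem? (d : PySem.Dict Int Char) (s : List Char) (j : Nat) :
    (rcRender d s)[j]? = s[j]?.map (fun c => (PySem.Dict.get? d (j : Int)).getD c) := by
  unfold rcRender
  rw [List.getElem?_map, PySem.List.getElem?_enumerate]
  cases s[j]? <;> simp

-- the crux: one splice into a rendered string is six overwrites of the override dict
theorem rc_splice_render (d : PySem.Dict Int Char) (s : List Char) (i : Int) (rep : List Char)
    (hi : 0 ≤ i) (hlen : rep.length = 6) (hub : i + 6 ≤ (s.length : Int)) :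
    rcA_repl (rcRender d s) i rep
      = rcRender ((PySem.List.enumerate rep 0).foldl (fun d p => d.insert (i + p.1) p.2) d) s := by
  rcases rep with _ | ⟨c0, _ | ⟨c1, _ | ⟨c2, _ | ⟨c3, _ | ⟨c4, _ | ⟨c5, _ | ⟨c6, t⟩⟩⟩⟩⟩⟩⟩ <;>
    try simp at hlen
  obtain ⟨k, rfl⟩ : ∃ k : Nat, i = (k : Int) := ⟨i.toNat, (Int.toNat_of_nonneg hi).symm⟩
  have hk6 : k + 6 ≤ s.length := by omega
  have hL : (rcRender d s).length = s.length := rc_render_length d s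
  rw [rc_repl_eq]
  simp only [PySem.List.enumerate_cons, PySem.List.enumerate_nil, List.foldl_cons, List.foldl_nil]
  apply List.ext_getElem?
  intro j
  rw [rc_render_getElem?]
  have htl : ((rcRender d s).take k).length = k := by rw [List.length_take]; omega
  by_cases hjlen : j < s.length
  · have hsj : s[j]? = some s[j] := List.getElem?_eq_getElem hjlen
    rw [hsj]
    by_cases hj1 : j < k
    · rw [List.getElem?_append_left (by rw [List.length_append, htl]; omega),
          List.getElem?_append_left (by rw [htl]; omega),
          List.getElem?_take_of_lt hj1, rc_render_getElem?, hsj]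
      simp only [Option.map_some, Option.some_inj]
      rw [PySem.Dict.get?_insert, if_neg (by omega), PySem.Dict.get?_insert, if_neg (by omega),
          PySem.Dict.get?_insert, if_neg (by omega), PySem.Dict.get?_insert, if_neg (by omega),
          PySem.Dict.get?_insert, if_neg (by omega), PySem.Dict.get?_insert, if_neg (by omega)]
    · by_cases hj2 : j < k + 6
      · rw [List.getElem?_append_left (by rw [List.length_append, htl]; simp; omega),
            List.getElem?_append_right (by rw [htl]; omega), htl]
        rcases (by omega : j = k ∨ j = k + 1 ∨ j = k + 2 ∨ j = k + 3 ∨ j = k + 4 ∨ j = k + 5)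
          with rfl | rfl | rfl | rfl | rfl | rfl <;>
          simp only [Nat.add_sub_cancel_left, Nat.sub_self, PySem.Dict.get?_insert] <;>
          push_cast <;>
          split_ifs <;> first | omega | simp
      · rw [List.getElem?_append_right (by rw [List.length_append, htl]; simp; omega)]
        rw [List.length_append, htl]
        simp only [List.length_cons, List.length_nil]
        rw [List.getElem?_drop, show k + 6 + (j - (k + 6)) = j from by omega,
            rc_render_getElem?, hsj]
        simp only [Option.map_some, Option.some_inj]
        rw [PySem.Dict.get?_insert, if_neg (by omega), PySem.Dict.get?_insert, if_neg (by omega),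
            PySem.Dict.get?_insert, if_neg (by omega), PySem.Dict.get?_insert, if_neg (by omega),
            PySem.Dict.get?_insert, if_neg (by omega), PySem.Dict.get?_insert, if_neg (by omega)]
  · have hsj : s[j]? = none := List.getElem?_eq_none (by omega)
    rw [hsj]
    apply List.getElem?_eq_none
    rw [List.length_append, List.length_append, htl, List.length_drop, hL]
    simp only [List.length_cons, List.length_nil]
    omega

-- every collected match lies inside the string and carries a 6-char replacement
theorem rc_matches_bounds (s : List Char) (m : Int × List Char)
    (hm : m ∈ rcB_matches s (s.length : Int)) :
    0 ≤ m.1 ∧ m.1 + 6 ≤ (s.length : Int) ∧ m.2.length = 6 := by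
  unfold rcB_matches at hm
  obtain ⟨i, hi, hsome⟩ := List.mem_filterMap.mp hm
  obtain ⟨hi0, hiu⟩ := PySem.List.mem_pyRange_one.mp hi
  unfold rcB_match at hsome
  cases hg : PySem.Dict.get? rcB_table (PySem.List.slice s (some i) (some (i + 6))) with
  | none => rw [hg] at hsome; simp at hsome
  | some rep =>
      rw [hg] at hsome
      simp only [Option.map_some, Option.some_inj] at hsome
      subst hsome
      refine ⟨hi0, by omega, ?_⟩
      simp only [rcB_table, PySem.Dict.get?_mk_cons] at hg
      split_ifs at hg <;>
        first
          | (simp only [Option.some_inj] at hg; subst hg; split_ifs <;> simp)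
          | simp [PySem.Dict.get?] at hg

-- folding A's splice over any in-bounds match list = rendering through B's override dict
theorem rc_foldl_splice (s : List Char) (ms : List (Int × List Char))
    (h : ∀ m ∈ ms, 0 ≤ m.1 ∧ m.1 + 6 ≤ (s.length : Int) ∧ m.2.length = 6) :
    ms.foldl (fun ns m => rcA_repl ns m.1 m.2) s = rcRender (rcB_cover ms) s := by
  induction ms using List.reverseRecOn with
  | nil => exact (rc_render_empty s).symm
  | append_singleton ms m ih =>
      obtain ⟨h1, h2, h3⟩ := h m (by simp)
      rw [List.foldl_append, List.foldl_cons, List.foldl_nil,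
          ih (fun x hx => h x (by simp [hx]))]
      unfold rcB_cover
      rw [List.foldl_append, List.foldl_cons, List.foldl_nil]
      exact rc_splice_render _ s m.1 m.2 h1 h3 h2

-- beyond len-6 the window is short, so B's table never matches
theorem rc_match_none (s : List Char) (x : Int) (hx : 0 ≤ x) (h : (s.length : Int) < x + 6) :
    rcB_match s x = none := by
  have hlen : (PySem.List.slice s (some x) (some (x + 6))).length < 6 := by
    rw [PySem.List.length_slice]
    have h1 := PySem.List.clampIdx_le s.length (x + 6)
    have h2 : PySem.List.clampIdx s.length x = min x.toNat s.length := by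
      rw [← Int.toNat_of_nonneg hx, PySem.List.clampIdx_natCast]; omega
    omega
  have h1 : PySem.List.slice s (some x) (some (x + 6)) ≠ "GAATTC".toList := by
    intro e; rw [e] at hlen; simp at hlen
  have h2 : PySem.List.slice s (some x) (some (x + 6)) ≠ "CTCGAG".toList := by
    intro e; rw [e] at hlen; simp at hlen
  have h5 : PySem.List.slice s (some x) (some (x + 6)) ≠ "AAGCCT".toList := by
    intro e; rw [e] at hlen; simp at hlen
  simp at h1 h2 h5
  simp [rcB_match, rcB_table, PySem.Dict.get?, Ne.symm h1, Ne.symm h2, Ne.symm h5]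

-- ===== VERDICT (by name: the statement is the Claim_ definition above) =====
theorem remove_cutsites_spec : Claim_equal_remove_cutsites := by
  unfold Claim_equal_remove_cutsites Spec_remove_cutsites
  intro seq _
  unfold remove_cutsites remove_cutsites_alt
  rw [PySem.Str.len_eq]
  dsimp only
  congr 1
  have hstep : (PySem.List.pyRange 0 (seq.toList.length : Int) 1).foldl (rcA_step seq.toList) seq.toList
      = ((PySem.List.pyRange 0 (seq.toList.length : Int) 1).filterMap (rcB_match seq.toList)).foldl
          (fun ns m => rcA_repl ns m.1 m.2) seq.toList := by
    rw [← rc_foldl_filterMap (rcB_match seq.toList) (fun ns m => rcA_repl ns m.1 m.2)]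
    apply PySem.List.foldl_congr_mem'
    intro x hxmem acc
    rw [rc_step_match seq.toList acc x]
    cases rcB_match seq.toList x <;> rfl
  have hsplit : (PySem.List.pyRange 0 (seq.toList.length : Int) 1).filterMap (rcB_match seq.toList)
      = rcB_matches seq.toList (seq.toList.length : Int) := by
    unfold rcB_matches
    by_cases h5 : 5 ≤ seq.toList.length
    · rw [PySem.List.pyRange_one_append 0 ((seq.toList.length : Int) - 5) (seq.toList.length : Int)
          (by omega) (by omega), List.filterMap_append]
      have : (PySem.List.pyRange ((seq.toList.length : Int) - 5) (seq.toList.length : Int) 1).filterMap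
          (rcB_match seq.toList) = [] := by
        apply List.filterMap_eq_nil_iff.mpr
        intro x hxmem
        obtain ⟨hx0, hxu⟩ := PySem.List.mem_pyRange_one.mp hxmem
        simp [rc_match_none seq.toList x (by omega) (by omega)]
      rw [this, List.append_nil]
    · rw [PySem.List.pyRange_one_eq_nil (by omega : (seq.toList.length : Int) - 5 ≤ 0)]
      apply List.filterMap_eq_nil_iff.mpr
      intro x hxmem
      obtain ⟨hx0, hxu⟩ := PySem.List.mem_pyRange_one.mp hxmem
      simp [rc_match_none seq.toList x (by omega) (by omega)]
  rw [hstep, hsplit]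
  exact rc_foldl_splice seq.toList _ (rc_matches_bounds seq.toList)
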